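-- pv_equiv track=rewrite | github.com/rjavier97/Algo1.2C2023 | 2parcialTema1.py | acomodar
-- ===== SOURCE A (Python) =====
-- def acomodar(s1: list) -> list:
--     res:[str] = []
--     listaUP:[str] = []
--     listaLLA:[str] = []
--     for elemento in s1 :
--         if elemento == 'UP' :
--             listaUP.append('UP')
--         else :
--             listaLLA.append('LLA')
--     res = listaUP + listaLLA
--     return res
-- ===== SOURCE B (Python) =====
-- def acomodar(s1: list) -> list:
--     # Normalize each element to its group label, then let a stable sort
--     # move the 'UP' labels (key False) ahead of the 'LLA' labels (key True).
--     return sorted(('UP' if e == 'UP' else 'LLA' for e in s1),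
--                   key=lambda x: x != 'UP')
-- ===== Notes on version B (the rewrite author's own statement) =====
-- stated objective: alternative
-- what changed: B maps every element to its group label and then stable-sorts by the boolean key (x != 'UP'), so the grouping is done by a sort instead of A's conditional appends into two accumulator lists that are concatenated.
import Mathlib
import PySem

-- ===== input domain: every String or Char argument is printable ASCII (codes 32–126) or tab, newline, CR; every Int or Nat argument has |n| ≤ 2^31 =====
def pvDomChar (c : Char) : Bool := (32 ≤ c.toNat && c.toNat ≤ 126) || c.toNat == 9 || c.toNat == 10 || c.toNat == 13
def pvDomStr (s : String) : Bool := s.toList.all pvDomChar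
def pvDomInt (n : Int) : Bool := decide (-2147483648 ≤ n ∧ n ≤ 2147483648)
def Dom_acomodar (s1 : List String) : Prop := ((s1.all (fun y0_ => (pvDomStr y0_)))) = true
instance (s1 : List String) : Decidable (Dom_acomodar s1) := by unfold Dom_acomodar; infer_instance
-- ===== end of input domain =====

-- B maps every element to its group label and stable-sorts by the key (x != 'UP')
-- instead of A's conditional appends into two accumulator lists; objective: alternative.

-- ===== PORT A =====
-- A: one loop appending "UP" to listaUP or "LLA" to listaLLA, then concatenation.
def acomodar (s1 : List String) : List String :=
  let p := s1.foldl (fun (acc : List String × List String) elemento =>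
    if elemento = "UP" then (acc.1 ++ ["UP"], acc.2) else (acc.1, acc.2 ++ ["LLA"])) ([], [])
  p.1 ++ p.2

-- ===== PORT B =====
-- B: sorted(('UP' if e == 'UP' else 'LLA' for e in s1), key=lambda x: x != 'UP')
-- (Python's bools sort as False < True; ported with the Bool key and Bool's order.)
def acomodar_alt (s1 : List String) : List String :=
  PySem.List.sorted (s1.map fun e => if e = "UP" then "UP" else "LLA")
    (fun x => x != "UP") false

-- ===== PRECONDITION & SPEC =====
def Spec_acomodar (s1 : List String) (out : List String) : Prop := out = acomodar_alt s1
instance (s1 : List String) (out : List String) : Decidable (Spec_acomodar s1 out) := by unfold Spec_acomodar; infer_instance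

-- ===== CLAIM (what is proved, stated in full; the proofs are below) =====
def Claim_equal_acomodar : Prop := ∀ (s1 : List String), Dom_acomodar s1 → Spec_acomodar s1 (acomodar s1)

-- ===== LEMMAS AND PROOFS =====

-- A's loop: the two accumulators grow to a run of "UP"s and a run of "LLA"s.
theorem acomodar_loopA (s1 : List String) (u l : List String) :
    s1.foldl (fun (acc : List String × List String) elemento =>
      if elemento = "UP" then (acc.1 ++ ["UP"], acc.2) else (acc.1, acc.2 ++ ["LLA"])) (u, l)
    = (u ++ List.replicate (List.count "UP" s1) "UP",
       l ++ List.replicate (s1.length - List.count "UP" s1) "LLA") := by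
  induction s1 generalizing u l with
  | nil => simp
  | cons x xs ih =>
    by_cases h : x = "UP"
    · simp only [h, List.foldl_cons, ih, List.count_cons, beq_self_eq_true,
        if_pos, List.length_cons]
      refine Prod.ext ?_ ?_
      · rw [List.replicate_succ', List.append_assoc]
        rw [List.singleton_append, ← List.replicate_succ, List.replicate_succ']
      · simp [Nat.succ_sub_succ]
    · have hb : (x == "UP") = false := by simp [h]
      simp only [List.foldl_cons, if_neg h, ih, List.count_cons, hb, Bool.false_eq_true,
        if_false, Nat.add_zero, List.length_cons]
      have hc : List.count "UP" xs ≤ xs.length := List.count_le_length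
      refine Prod.ext rfl ?_
      rw [Nat.succ_sub hc, List.replicate_succ', List.append_assoc]
      rw [List.singleton_append, ← List.replicate_succ, List.replicate_succ']

-- Inserting "UP" (key false) into a run of "UP"s followed by a run of "LLA"s.
theorem insertBy_UP (a b : Nat) :
    PySem.List.insertBy (fun x y : String => decide ((x != "UP") < (y != "UP"))) "UP"
      (List.replicate a "UP" ++ List.replicate b "LLA")
    = List.replicate (a + 1) "UP" ++ List.replicate b "LLA" := by
  induction a with
  | zero =>
    cases b with
    | zero => simp [PySem.List.insertBy]
    | succ b => simp [List.replicate_succ, PySem.List.insertBy]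
  | succ a ih =>
    rw [List.replicate_succ, List.cons_append, PySem.List.insertBy]
    simp only [decide_eq_true_eq]
    rw [if_neg (by simp), ih]
    simp [List.replicate_succ]

-- Inserting "LLA" (key true): never before anything, so it lands at the end.
theorem insertBy_LLA (a b : Nat) :
    PySem.List.insertBy (fun x y : String => decide ((x != "UP") < (y != "UP"))) "LLA"
      (List.replicate a "UP" ++ List.replicate b "LLA")
    = List.replicate a "UP" ++ List.replicate (b + 1) "LLA" := by
  rw [PySem.List.insertBy_of_forall_not_before _ _ _ ?_]
  · rw [List.append_assoc, ← List.replicate_succ']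
  · intro y _
    simp only [decide_eq_false_iff_not]
    by_cases h : y = "UP" <;> simp [h]

-- B's insertion-sort loop keeps the "UP"-run ++ "LLA"-run shape.
theorem acomodar_loopB (xs : List String) (a b : Nat) :
    xs.foldl (fun acc e =>
        PySem.List.insertBy (fun x y : String => decide ((x != "UP") < (y != "UP")))
          (if e = "UP" then "UP" else "LLA") acc)
      (List.replicate a "UP" ++ List.replicate b "LLA")
    = List.replicate (a + List.count "UP" xs) "UP"
      ++ List.replicate (b + (xs.length - List.count "UP" xs)) "LLA" := by
  induction xs generalizing a b with
  | nil => simp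
  | cons x xs ih =>
    by_cases h : x = "UP"
    · rw [List.foldl_cons, if_pos h, insertBy_UP, ih]
      simp [h, Nat.succ_sub_succ, Nat.add_comm, Nat.add_left_comm]
    · have hb : (x == "UP") = false := by simp [h]
      rw [List.foldl_cons, if_neg h, insertBy_LLA, ih]
      have hc : List.count "UP" xs ≤ xs.length := List.count_le_length
      have : xs.length + 1 - List.count "UP" xs = (xs.length - List.count "UP" xs) + 1 :=
        by omega
      simp [List.count_cons, hb, List.length_cons, this, Nat.add_comm,
        Nat.add_left_comm]

-- ===== VERDICT (by name: the statement is the Claim_ definition above) =====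
theorem acomodar_spec : Claim_equal_acomodar := by
  intro s1 _
  unfold Spec_acomodar acomodar acomodar_alt
  have hB := acomodar_loopB s1 0 0
  simp only [List.replicate, List.nil_append, Nat.zero_add] at hB
  rw [PySem.List.sorted_eq_foldl_insertBy, List.foldl_map, acomodar_loopA, hB]
  simp
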